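-- pv_equiv track=rewrite | github.com/kalinaowo/yet-another-blue-archive-mod-manager | utils/CRC_tool.py | gf_modular_inverse
-- ===== SOURCE A (Python) =====
-- def gf_multiply(a, b):
--     result = 0
--     while b:
--         if b & 1:
--             result ^= a
--         a <<= 1
--         b >>= 1
--     return result
--
-- def gf_divide(dividend, divisor):
--     if divisor == 0:
--         return 0
--     quotient = 0
--     remainder = dividend
--     divisor_bits = divisor.bit_length()
--     while remainder.bit_length() >= divisor_bits and remainder != 0:
--         shift = remainder.bit_length() - divisor_bits
--         quotient |= 1 << shift
--         remainder ^= divisor << shift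
--     return quotient
--
-- def gf_modular_inverse(a, m):
--     if a == 0:
--         raise ValueError("Inverse of zero does not exist")
--     old_r, r = m, a
--     old_s, s = 0, 1
--     while r != 0:
--         q = gf_divide(old_r, r)
--         old_r, r = r, old_r ^ gf_multiply(q, r)
--         old_s, s = s, old_s ^ gf_multiply(q, s)
--     if old_r != 1:
--         raise ValueError("Modular inverse does not exist")
--     return old_s
-- ===== SOURCE B (Python) =====
-- def _clmul(a, b):
--     # recursive carry-less (GF(2)) multiplication
--     if b == 0:
--         return 0
--     return (a if b & 1 else 0) ^ _clmul(a << 1, b >> 1)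
--
-- def _gf_divmod(x, y):
--     # recursive GF(2) polynomial division: returns (quotient, remainder)
--     if y == 0 or x.bit_length() < y.bit_length():
--         return 0, x
--     j = x.bit_length() - y.bit_length()
--     q, r = _gf_divmod(x ^ (y << j), y)
--     return (1 << j) ^ q, r
--
-- def _gf_egcd(r0, r1):
--     # returns (g, x, y) with clmul(x, r0) ^ clmul(y, r1) == g over GF(2)[x]
--     if r1 == 0:
--         return r0, 1, 0
--     q, r = _gf_divmod(r0, r1)
--     g, x, y = _gf_egcd(r1, r)
--     return g, y, x ^ _clmul(q, y)
--
-- def gf_modular_inverse(a, m):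
--     if a == 0:
--         raise ValueError("Inverse of zero does not exist")
--     g, x, y = _gf_egcd(m, a)
--     if g != 1:
--         raise ValueError("Modular inverse does not exist")
--     return y
-- ===== Notes on version B (the rewrite author's own statement) =====
-- stated objective: alternative
-- what changed: A's iterative extended Euclid (a quotient-only division loop, remainder recomputed as old_r ^ gf_multiply(q, r), four running state variables) is replaced by fully recursive primitives of B's own: a recursive carry-less multiply, a recursive divmod returning quotient and remainder together, and a recursive egcd that rebuilds the Bezout coefficient on the way back up.
import Mathlib
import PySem

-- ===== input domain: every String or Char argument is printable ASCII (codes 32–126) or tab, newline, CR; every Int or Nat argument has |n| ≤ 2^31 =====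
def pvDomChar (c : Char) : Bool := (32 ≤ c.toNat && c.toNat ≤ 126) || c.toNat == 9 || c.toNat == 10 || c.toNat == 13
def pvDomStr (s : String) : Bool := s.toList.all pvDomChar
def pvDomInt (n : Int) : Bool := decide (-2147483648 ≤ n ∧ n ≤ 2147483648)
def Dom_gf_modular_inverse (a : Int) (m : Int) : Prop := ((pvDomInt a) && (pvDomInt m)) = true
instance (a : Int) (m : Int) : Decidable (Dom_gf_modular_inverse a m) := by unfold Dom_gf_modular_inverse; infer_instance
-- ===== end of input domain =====

-- B replaces A's iterative extended Euclid (quotient-only division, remainder recomputed as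
-- old_r ^ gf_multiply(q, r)) by fully recursive primitives of its own: a recursive carry-less
-- multiply, a recursive divmod returning quotient AND remainder together, and a recursive
-- egcd rebuilding the Bézout coefficient on return; objective: alternative (same cost).

-- ===== PORT A =====
-- Python's n.bit_length() (values here are nonnegative)
def pyBitLen (n : Nat) : Nat := PySem.Int.bitLength (n : Int)

-- `while b:` loop of gf_multiply; fuel bounds the recursion depth (b halves each step,
-- so b+1 is always enough); state (a, b, result) exactly as in Python
def gfMulGo : Nat → Nat → Nat → Nat → Nat
  | 0, _, _, result => result
  | fuel+1, a, b, result =>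
    if b = 0 then result
    else gfMulGo fuel (a <<< 1) (b >>> 1) (if b &&& 1 = 1 then result ^^^ a else result)

def gfMultiply (a b : Nat) : Nat := gfMulGo (b + 1) a b 0

-- `while remainder.bit_length() >= divisor_bits and remainder != 0:` loop of gf_divide;
-- the remainder strictly decreases, so dividend+1 fuel is always enough
def gfDivGo : Nat → Nat → Nat → Nat → Nat → Nat
  | 0, _, _, quotient, _ => quotient
  | fuel+1, divisor, divisorBits, quotient, remainder =>
    if divisorBits ≤ pyBitLen remainder ∧ remainder ≠ 0 then
      let shift := pyBitLen remainder - divisorBits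
      gfDivGo fuel divisor divisorBits (quotient ||| (1 <<< shift))
        (remainder ^^^ (divisor <<< shift))
    else quotient

def gfDivide (dividend divisor : Nat) : Nat :=
  if divisor = 0 then 0
  else gfDivGo (dividend + 1) divisor (pyBitLen divisor) 0 dividend

-- `while r != 0:` loop of A, state (old_r, r, old_s, s); r strictly decreases, so the
-- initial r (= a) plus one bounds the iteration count
def gfInvGo : Nat → Nat → Nat → Nat → Nat → Nat × Nat
  | 0, oldR, _, oldS, _ => (oldR, oldS)
  | fuel+1, oldR, r, oldS, s =>
    if r = 0 then (oldR, oldS)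
    else
      let q := gfDivide oldR r
      gfInvGo fuel r (oldR ^^^ gfMultiply q r) s (oldS ^^^ gfMultiply q s)

-- On Pre_ all values are nonnegative, so the Int arguments are modelled in Nat (exact there).
-- The two `raise ValueError` branches of A (a == 0, gcd ≠ 1) are excluded by Pre_.
def gf_modular_inverse (a : Int) (m : Int) : Int :=
  ((gfInvGo (a.toNat + 1) m.toNat a.toNat 0 1).2 : Int)

-- ===== PORT B =====
-- recursive carry-less multiplication _clmul of Source B
def gfClmul (a b : Nat) : Nat :=
  if b = 0 then 0
  else (if b &&& 1 = 1 then a else 0) ^^^ gfClmul (a <<< 1) (b >>> 1)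
termination_by b
decreasing_by
  simp only [Nat.shiftRight_one]
  exact Nat.div_lt_self (Nat.pos_of_ne_zero (by assumption)) one_lt_two

-- recursive GF(2) divmod _gf_divmod of Source B; fuel bounds the recursion depth (the
-- dividend strictly decreases, so x+1 is always enough)
def gfDivmodGo : Nat → Nat → Nat → Nat × Nat
  | 0, x, _ => (0, x)
  | fuel+1, x, y =>
    if y = 0 ∨ pyBitLen x < pyBitLen y then (0, x)
    else
      let j := pyBitLen x - pyBitLen y
      let p := gfDivmodGo fuel (x ^^^ (y <<< j)) y
      ((1 <<< j) ^^^ p.1, p.2)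

def gfDivmod (x y : Nat) : Nat × Nat := gfDivmodGo (x + 1) x y

-- recursive extended Euclid _gf_egcd of Source B: (g, x, y) with the Bézout coefficients
-- rebuilt on the way back up; the second argument strictly decreases, a+1 fuel is enough
def gfEgcd : Nat → Nat → Nat → Nat × Nat × Nat
  | 0, r0, _ => (r0, 1, 0)
  | fuel+1, r0, r1 =>
    if r1 = 0 then (r0, 1, 0)
    else
      let p := gfDivmod r0 r1
      let t := gfEgcd fuel r1 p.2
      (t.1, t.2.2, t.2.1 ^^^ gfClmul p.1 t.2.2)

def gf_modular_inverse_alt (a : Int) (m : Int) : Int :=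
  ((gfEgcd (a.toNat + 1) m.toNat a.toNat).2.2 : Int)

-- ===== PRECONDITION & SPEC =====
-- GF(2)-polynomial gcd used only to STATE the precondition (plain top-bit-cancellation
-- gcd: no quotients, no Bézout data — not the ports' algorithm).  Each step lowers the
-- bit length of one argument, so the total bit length bounds the number of steps.
def gf2gcdGo : Nat → Nat → Nat → Nat
  | 0, a, b => a ^^^ b
  | fuel+1, a, b =>
    if a = 0 then b
    else if b = 0 then a
    else if pyBitLen b ≤ pyBitLen a then
      gf2gcdGo fuel (a ^^^ (b <<< (pyBitLen a - pyBitLen b))) b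
    else
      gf2gcdGo fuel a (b ^^^ (a <<< (pyBitLen b - pyBitLen a)))

def gf2gcd (a b : Nat) : Nat := gf2gcdGo (pyBitLen a + pyBitLen b) a b

-- Pre_ excludes exactly the inputs where the Python A does not return a value: a == 0 and
-- non-coprime pairs raise ValueError, and negative a or m make gf_multiply/gf_divide loop
-- forever (Python's >> of a negative number never reaches 0).
def Pre_gf_modular_inverse (a : Int) (m : Int) : Prop :=
  1 ≤ a ∧ 0 ≤ m ∧ gf2gcd m.toNat a.toNat = 1

instance (a : Int) (m : Int) : Decidable (Pre_gf_modular_inverse a m) := by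
  unfold Pre_gf_modular_inverse; infer_instance

def pvWitness_gf_modular_inverse : Int × Int := (3, 7)

def Spec_gf_modular_inverse (a : Int) (m : Int) (out : Int) : Prop := out = gf_modular_inverse_alt a m
instance (a : Int) (m : Int) (out : Int) : Decidable (Spec_gf_modular_inverse a m out) := by
  unfold Spec_gf_modular_inverse; infer_instance

-- ===== CLAIM (what is proved, stated in full; the proofs are below) =====
def Claim_equal_gf_modular_inverse : Prop := ∀ (a : Int) (m : Int), Dom_gf_modular_inverse a m → Pre_gf_modular_inverse a m → Spec_gf_modular_inverse a m (gf_modular_inverse a m)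

-- ===== LEMMAS AND PROOFS =====
-- Carry-less (GF(2)-polynomial) multiplication, the clean arithmetical form used for the proof.
def clmul (a b : Nat) : Nat :=
  if b = 0 then 0 else (if b % 2 = 1 then a else 0) ^^^ clmul (2*a) (b/2)
termination_by b
decreasing_by exact Nat.div_lt_self (Nat.pos_of_ne_zero (by assumption)) one_lt_two

theorem clmul_def (a b : Nat) :
    clmul a b = if b = 0 then 0 else (if b % 2 = 1 then a else 0) ^^^ clmul (2*a) (b/2) := by
  rw [clmul]

theorem clmul_zero_right (a : Nat) : clmul a 0 = 0 := by rw [clmul]; simp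

theorem clmul_zero_left (b : Nat) : clmul 0 b = 0 := by
  induction b using Nat.strong_induction_on with
  | _ b ih =>
    rw [clmul]
    split
    · rfl
    · rw [Nat.mul_zero, ih _ (Nat.div_lt_self (Nat.pos_of_ne_zero (by assumption)) one_lt_two)]
      split <;> rfl

theorem two_mul_xor (x y : Nat) : 2*(x ^^^ y) = 2*x ^^^ 2*y := by
  apply Nat.eq_of_testBit_eq; intro i
  simp only [Nat.testBit_xor]
  rcases i with _ | i <;>
    simp [Nat.testBit_zero, Nat.testBit_succ, Nat.mul_mod_right, Nat.testBit_xor]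

theorem two_mul_xor_one (x : Nat) : 2*x ^^^ 1 = 2*x + 1 := by
  apply Nat.eq_of_testBit_eq; intro i
  simp only [Nat.testBit_xor]
  rcases i with _ | i <;>
    simp [Nat.testBit_zero, Nat.testBit_succ, Nat.mul_mod_right,
      Nat.mul_add_div, Nat.zero_testBit]

theorem clmul_two_mul_left (a b : Nat) : clmul (2*a) b = 2 * clmul a b := by
  induction b using Nat.strong_induction_on generalizing a with
  | _ b ih =>
    by_cases hb : b = 0
    · subst hb; simp [clmul_zero_right]
    · rw [clmul_def (2*a) b, clmul_def a b, if_neg hb, if_neg hb,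
        ih _ (Nat.div_lt_self (Nat.pos_of_ne_zero hb) one_lt_two) (2*a), two_mul_xor]
      congr 1
      split <;> simp

theorem clmul_exp (a b : Nat) (hb : b ≠ 0) :
    clmul a b = (if b % 2 = 1 then a else 0) ^^^ 2 * clmul a (b/2) := by
  rw [clmul_def, if_neg hb, clmul_two_mul_left]

theorem clmul_cross (a b : Nat) :
    (if b % 2 = 1 then a else 0) ^^^ 2*(if a % 2 = 1 then b/2 else 0)
      = (if a % 2 = 1 then b else 0) ^^^ 2*(if b % 2 = 1 then a/2 else 0) := by
  by_cases hpa : a % 2 = 1 <;> by_cases hpb : b % 2 = 1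
  · simp only [hpa, hpb, if_true]
    obtain ⟨a', rfl⟩ : ∃ k, a = 2*k+1 := ⟨a/2, by omega⟩
    obtain ⟨b', rfl⟩ : ∃ k, b = 2*k+1 := ⟨b/2, by omega⟩
    have hda : (2*a'+1)/2 = a' := by omega
    have hdb : (2*b'+1)/2 = b' := by omega
    rw [hda, hdb, ← two_mul_xor_one a', ← two_mul_xor_one b']
    simp [Nat.xor_comm, Nat.xor_left_comm]
  · have h2 : 2*(b/2) = b := by omega
    simp [hpa, hpb, h2]
  · have h2 : 2*(a/2) = a := by omega
    simp [hpa, hpb, h2]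
  · simp [hpa, hpb]

theorem clmul_exp_left (b a : Nat) :
    clmul a b = (if a % 2 = 1 then b else 0) ^^^ 2 * clmul (a/2) b := by
  induction b using Nat.strong_induction_on generalizing a with
  | _ b ih =>
    by_cases hb : b = 0
    · subst hb; simp [clmul_zero_right]
    · rw [clmul_exp a b hb, ih (b/2) (Nat.div_lt_self (Nat.pos_of_ne_zero hb) one_lt_two) a,
        clmul_exp (a/2) b hb, two_mul_xor, two_mul_xor,
        ← Nat.xor_assoc, ← Nat.xor_assoc, clmul_cross]

theorem clmul_comm (a b : Nat) : clmul a b = clmul b a := by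
  induction a using Nat.strong_induction_on generalizing b with
  | _ a ih =>
    by_cases ha : a = 0
    · subst ha; rw [clmul_zero_left, clmul_zero_right]
    · rw [clmul_exp_left b a, clmul_exp b a ha,
        ih (a/2) (Nat.div_lt_self (Nat.pos_of_ne_zero ha) one_lt_two) b]

theorem clmul_one_right (a : Nat) : clmul a 1 = a := by
  rw [clmul_def]; simp [clmul_zero_right]

theorem clmul_one_left (b : Nat) : clmul 1 b = b := by
  rw [clmul_comm, clmul_one_right]

theorem clmul_xor_right (c x y : Nat) : clmul (x ^^^ y) c = clmul x c ^^^ clmul y c := by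
  induction c using Nat.strong_induction_on generalizing x y with
  | _ c ih =>
    by_cases hc : c = 0
    · subst hc; simp [clmul_zero_right]
    · rw [clmul_exp _ c hc, clmul_exp x c hc, clmul_exp y c hc,
        ih (c/2) (Nat.div_lt_self (Nat.pos_of_ne_zero hc) one_lt_two) x y, two_mul_xor]
      by_cases hp : c % 2 = 1 <;>
        simp [hp, Nat.xor_assoc, Nat.xor_comm, Nat.xor_left_comm]

theorem clmul_xor_left (a x y : Nat) : clmul a (x ^^^ y) = clmul a x ^^^ clmul a y := by
  rw [clmul_comm, clmul_xor_right, clmul_comm x, clmul_comm y]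

theorem clmul_two_mul_right (a b : Nat) : clmul a (2*b) = 2 * clmul a b := by
  rw [clmul_comm, clmul_two_mul_left, clmul_comm]

theorem clmul_assoc (a b c : Nat) : clmul (clmul a b) c = clmul a (clmul b c) := by
  induction c using Nat.strong_induction_on generalizing a b with
  | _ c ih =>
    by_cases hc : c = 0
    · subst hc; simp [clmul_zero_right]
    · rw [clmul_exp _ c hc, clmul_exp b c hc, clmul_xor_left,
        ih (c/2) (Nat.div_lt_self (Nat.pos_of_ne_zero hc) one_lt_two) a b,
        clmul_two_mul_right]
      by_cases hp : c % 2 = 1 <;> simp [hp, clmul_zero_right]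

-- A's accumulator loop computes the carry-less product
theorem gfMulGo_eq (fuel : Nat) : ∀ a b acc, b < fuel → gfMulGo fuel a b acc = acc ^^^ clmul a b := by
  induction fuel with
  | zero => intro a b acc h; omega
  | succ fuel ih =>
    intro a b acc h
    by_cases hb : b = 0
    · subst hb; simp [gfMulGo, clmul_zero_right]
    · rw [gfMulGo, if_neg hb, ih _ _ _ (by
        have : b >>> 1 = b / 2 := Nat.shiftRight_one b
        omega)]
      rw [clmul_def a b, if_neg hb, Nat.shiftRight_one, Nat.and_one_is_mod,
        Nat.shiftLeft_eq, pow_one, Nat.mul_comm a 2]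
      by_cases hp : b % 2 = 1 <;>
        simp [hp, Nat.xor_assoc]

theorem gfMultiply_eq (a b : Nat) : gfMultiply a b = clmul a b := by
  rw [gfMultiply, gfMulGo_eq (b+1) a b 0 (by omega), Nat.zero_xor]

-- B's recursive multiply computes the same product
theorem gfClmul_eq (a b : Nat) : gfClmul a b = clmul a b := by
  induction b using Nat.strong_induction_on generalizing a with
  | _ b ih =>
    by_cases hb : b = 0
    · subst hb; rw [gfClmul, clmul]; simp
    · rw [gfClmul, clmul_def, if_neg hb, if_neg hb, Nat.shiftRight_one, Nat.and_one_is_mod,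
        Nat.shiftLeft_eq, pow_one, Nat.mul_comm a 2,
        ih _ (Nat.div_lt_self (Nat.pos_of_ne_zero hb) one_lt_two)]

-- bit-length facts (pyBitLen n = the Python bit_length of a nonnegative n)
theorem lt_two_pow_pyBitLen (n : Nat) : n < 2 ^ pyBitLen n := by
  have h := PySem.Int.lt_two_pow_bitLength (n : Int)
  simpa [pyBitLen] using h

theorem two_pow_pyBitLen_le {n : Nat} (h : n ≠ 0) : 2 ^ (pyBitLen n - 1) ≤ n := by
  have h2 := PySem.Int.two_pow_bitLength_le (n : Int) (by exact_mod_cast h)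
  simpa [pyBitLen] using h2

theorem pyBitLen_zero : pyBitLen 0 = 0 := by
  simp [pyBitLen, PySem.Int.bitLength_zero]

theorem pyBitLen_pos {n : Nat} (h : n ≠ 0) : 1 ≤ pyBitLen n := by
  by_contra hc
  have hb : pyBitLen n = 0 := by omega
  have := lt_two_pow_pyBitLen n
  rw [hb] at this
  omega

theorem pyBitLen_le_of_lt {n e : Nat} (h : n < 2 ^ e) : pyBitLen n ≤ e := by
  by_contra hc
  have hn : n ≠ 0 := by
    intro h0; subst h0
    rw [pyBitLen_zero] at hc; omega
  have h1 := two_pow_pyBitLen_le hn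
  have h2 : 2 ^ e ≤ 2 ^ (pyBitLen n - 1) := Nat.pow_le_pow_right (by omega) (by omega)
  omega

-- bits at or above position k of a number in [2^k, 2^(k+1)): only bit k, and it is set
theorem testBit_of_Ico {a k : Nat} (h1 : 2 ^ k ≤ a) (h2 : a < 2 ^ (k+1)) :
    ∀ i, k ≤ i → a.testBit i = decide (i = k) := by
  intro i hi
  by_cases hik : i = k
  · subst hik
    have hd : a / 2 ^ i = 1 :=
      Nat.div_eq_of_lt_le (by simpa using h1)
        (by rw [show ((1:Nat)+1) * 2 ^ i = 2 ^ (i+1) by ring]; exact h2)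
    simp [Nat.testBit, Nat.shiftRight_eq_div_pow, hd]
  · have hlt : a < 2 ^ i :=
      lt_of_lt_of_le h2 (Nat.pow_le_pow_right (by omega) (by omega))
    simp [Nat.testBit_lt_two_pow hlt, hik]

-- the top bits of two polynomials of the same degree cancel under xor
theorem xor_lt_of_Ico {a b k : Nat} (ha1 : 2 ^ k ≤ a) (ha2 : a < 2 ^ (k+1))
    (hb1 : 2 ^ k ≤ b) (hb2 : b < 2 ^ (k+1)) : a ^^^ b < 2 ^ k := by
  apply Nat.lt_pow_two_of_testBit
  intro i hi
  rw [Nat.testBit_xor, testBit_of_Ico ha1 ha2 i hi, testBit_of_Ico hb1 hb2 i hi]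
  simp

-- one division step lowers the dividend's bit length
theorem xor_shift_lt {x y : Nat} (hy : y ≠ 0) (h : pyBitLen y ≤ pyBitLen x) :
    x ^^^ (y <<< (pyBitLen x - pyBitLen y)) < 2 ^ (pyBitLen x - 1) := by
  have hx : x ≠ 0 := by
    intro h0; subst h0
    rw [pyBitLen_zero] at h
    have := pyBitLen_pos hy
    omega
  have hk1 : 1 ≤ pyBitLen x := pyBitLen_pos hx
  have hxk : (pyBitLen x - 1) + 1 = pyBitLen x := by omega
  apply xor_lt_of_Ico (two_pow_pyBitLen_le hx) (by rw [hxk]; exact lt_two_pow_pyBitLen x)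
  · rw [Nat.shiftLeft_eq]
    calc 2 ^ (pyBitLen x - 1) = 2 ^ (pyBitLen y - 1) * 2 ^ (pyBitLen x - pyBitLen y) := by
          rw [← pow_add]; congr 1; have := pyBitLen_pos hy; omega
      _ ≤ y * 2 ^ (pyBitLen x - pyBitLen y) :=
          Nat.mul_le_mul (two_pow_pyBitLen_le hy) (le_refl _)
  · rw [Nat.shiftLeft_eq, hxk]
    calc y * 2 ^ (pyBitLen x - pyBitLen y) < 2 ^ pyBitLen y * 2 ^ (pyBitLen x - pyBitLen y) :=
          Nat.mul_lt_mul_of_pos_right (lt_two_pow_pyBitLen y) (Nat.pow_pos (by omega))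
      _ = 2 ^ pyBitLen x := by rw [← pow_add]; congr 1; omega

-- the quotient produced by B's divmod has degree deg x - deg y
theorem gfDivmodGo_q_lt (fuel : Nat) : ∀ x y, y ≠ 0 →
    (gfDivmodGo fuel x y).1 < 2 ^ (pyBitLen x + 1 - pyBitLen y) := by
  induction fuel with
  | zero => intro x y hy; simp only [gfDivmodGo]; exact Nat.pow_pos (by omega)
  | succ fuel ih =>
    intro x y hy
    rw [gfDivmodGo]
    by_cases hc : y = 0 ∨ pyBitLen x < pyBitLen y
    · rw [if_pos hc]; exact Nat.pow_pos (by omega)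
    · rw [if_neg hc]
      show (1 <<< (pyBitLen x - pyBitLen y)) ^^^
          (gfDivmodGo fuel (x ^^^ (y <<< (pyBitLen x - pyBitLen y))) y).1
          < 2 ^ (pyBitLen x + 1 - pyBitLen y)
      have hble : pyBitLen y ≤ pyBitLen x := by
        rcases Nat.lt_or_ge (pyBitLen x) (pyBitLen y) with h | h
        · exact absurd (Or.inr h) hc
        · exact h
      have hq' := ih (x ^^^ (y <<< (pyBitLen x - pyBitLen y))) y hy
      have hbl' : pyBitLen (x ^^^ (y <<< (pyBitLen x - pyBitLen y))) ≤ pyBitLen x - 1 :=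
        pyBitLen_le_of_lt (xor_shift_lt hy hble)
      have hyp := pyBitLen_pos hy
      have hq'j : (gfDivmodGo fuel (x ^^^ (y <<< (pyBitLen x - pyBitLen y))) y).1
          < 2 ^ (pyBitLen x - pyBitLen y) :=
        lt_of_lt_of_le hq' (Nat.pow_le_pow_right (by omega) (by omega))
      have hlt : (2:Nat) ^ (pyBitLen x - pyBitLen y) < 2 ^ (pyBitLen x - pyBitLen y + 1) :=
        Nat.pow_lt_pow_right (by omega) (by omega)
      have hej : pyBitLen x + 1 - pyBitLen y = (pyBitLen x - pyBitLen y) + 1 := by omega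
      rw [hej, Nat.one_shiftLeft]
      exact Nat.xor_lt_two_pow hlt (lt_trans hq'j hlt)

theorem clmul_two_pow (j y : Nat) : clmul (2 ^ j) y = y <<< j := by
  induction j with
  | zero => simp [clmul_one_left, Nat.shiftLeft_eq]
  | succ j ih =>
    have : (2:Nat) ^ (j+1) = 2 * 2 ^ j := by ring
    rw [this, clmul_two_mul_left, ih, Nat.shiftLeft_eq, Nat.shiftLeft_eq, pow_succ]
    ring

-- divmod invariant: remainder = x ^ clmul(q, y)  (holds for every fuel)
theorem gfDivmodGo_rem (fuel : Nat) : ∀ x y,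
    (gfDivmodGo fuel x y).2 = x ^^^ clmul (gfDivmodGo fuel x y).1 y := by
  induction fuel with
  | zero => intro x y; simp [gfDivmodGo, clmul_zero_left]
  | succ fuel ih =>
    intro x y
    rw [gfDivmodGo]
    by_cases hc : y = 0 ∨ pyBitLen x < pyBitLen y
    · rw [if_pos hc]; simp [clmul_zero_left]
    · rw [if_neg hc]
      simp only
      rw [ih, clmul_xor_right, Nat.one_shiftLeft, clmul_two_pow]
      simp [Nat.xor_assoc]

-- A's quotient loop and B's recursive divmod produce the same quotient (same fuel)
theorem gfDivGo_eq (fuel : Nat) : ∀ rem acc y, y ≠ 0 →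
    gfDivGo fuel y (pyBitLen y) acc rem = acc ||| (gfDivmodGo fuel rem y).1 := by
  induction fuel with
  | zero => intro rem acc y hy; simp [gfDivGo, gfDivmodGo]
  | succ fuel ih =>
    intro rem acc y hy
    rw [gfDivGo, gfDivmodGo]
    by_cases h : pyBitLen y ≤ pyBitLen rem
    · have hrem : rem ≠ 0 := by
        intro h0; subst h0
        rw [pyBitLen_zero] at h
        have := pyBitLen_pos hy
        omega
      have hB : ¬(y = 0 ∨ pyBitLen rem < pyBitLen y) := by
        rintro (h0 | hlt)
        · exact hy h0
        · omega
      rw [if_pos ⟨h, hrem⟩, if_neg hB]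
      show gfDivGo fuel y (pyBitLen y) (acc ||| 1 <<< (pyBitLen rem - pyBitLen y))
            (rem ^^^ (y <<< (pyBitLen rem - pyBitLen y)))
          = acc ||| ((1 <<< (pyBitLen rem - pyBitLen y)) ^^^
            (gfDivmodGo fuel (rem ^^^ (y <<< (pyBitLen rem - pyBitLen y))) y).1)
      rw [ih _ _ _ hy]
      have hbl' : pyBitLen (rem ^^^ (y <<< (pyBitLen rem - pyBitLen y))) ≤ pyBitLen rem - 1 :=
        pyBitLen_le_of_lt (xor_shift_lt hy h)
      have hyp := pyBitLen_pos hy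
      have hq := gfDivmodGo_q_lt fuel (rem ^^^ (y <<< (pyBitLen rem - pyBitLen y))) y hy
      have hqj : (gfDivmodGo fuel (rem ^^^ (y <<< (pyBitLen rem - pyBitLen y))) y).1
          < 2 ^ (pyBitLen rem - pyBitLen y) :=
        lt_of_lt_of_le hq (Nat.pow_le_pow_right (by omega) (by omega))
      rw [Nat.or_assoc, Nat.one_shiftLeft]
      congr 1
      -- 2^j ||| q' = 2^j ^^^ q' : the quotient bits lie strictly below bit j
      apply Nat.eq_of_testBit_eq
      intro i
      rw [Nat.testBit_or, Nat.testBit_xor, Nat.testBit_two_pow]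
      by_cases hij : pyBitLen rem - pyBitLen y = i
      · rw [← hij, Nat.testBit_lt_two_pow hqj]
        simp
      · simp [hij]
    · rw [if_neg (fun hc2 => h hc2.1), if_pos (Or.inr (by omega))]
      simp

-- the key correspondence: A's loop state relates to B's recursive egcd by
-- old_s = clmul x s0 ^^^ clmul y s1
theorem clmul_step (q x y s0 s1 : Nat) :
    clmul x s1 ^^^ clmul y (s0 ^^^ clmul q s1)
      = clmul y s0 ^^^ clmul (x ^^^ clmul q y) s1 := by
  rw [clmul_xor_left, clmul_xor_right, ← clmul_assoc, clmul_comm y q]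
  simp [Nat.xor_left_comm]

theorem gfInvGo_eq_gfEgcd (fuel : Nat) : ∀ r0 r1 s0 s1,
    gfInvGo fuel r0 r1 s0 s1 =
      ((gfEgcd fuel r0 r1).1,
        clmul (gfEgcd fuel r0 r1).2.1 s0 ^^^ clmul (gfEgcd fuel r0 r1).2.2 s1) := by
  induction fuel with
  | zero =>
    intro r0 r1 s0 s1
    simp [gfInvGo, gfEgcd, clmul_one_left, clmul_zero_left]
  | succ fuel ih =>
    intro r0 r1 s0 s1
    by_cases hr : r1 = 0
    · subst hr; simp [gfInvGo, gfEgcd, clmul_one_left, clmul_zero_left]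
    · rw [gfInvGo, gfEgcd]
      simp only [if_neg hr]
      -- A's quotient equals B's quotient
      have hq : gfDivide r0 r1 = (gfDivmod r0 r1).1 := by
        rw [gfDivide, if_neg hr, gfDivmod, gfDivGo_eq (r0+1) r0 0 r1 hr, Nat.zero_or]
      -- A's new remainder equals B's remainder from divmod
      have hrem2 : r0 ^^^ gfMultiply (gfDivide r0 r1) r1 = (gfDivmod r0 r1).2 := by
        rw [gfMultiply_eq, hq, gfDivmod, gfDivmodGo_rem (r0+1) r0 r1]
      rw [hrem2, ih]
      simp only [gfMultiply_eq, gfClmul_eq, hq]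
      exact congrArg (Prod.mk _) (clmul_step _ _ _ _ _)

-- ===== VERDICT (by name: the statement is the Claim_ definition above) =====
theorem gf_modular_inverse_spec : Claim_equal_gf_modular_inverse := by
  intro a m _ _
  unfold Spec_gf_modular_inverse gf_modular_inverse gf_modular_inverse_alt
  rw [gfInvGo_eq_gfEgcd]
  simp [clmul_zero_right, clmul_one_right]
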